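-- pv_equiv track=rewrite | github.com/MarioLara21/TodasFunciones | RecPorColaF.py | colonizarAux
-- ===== SOURCE A (Python) =====
-- def colonizarAux(gen,genPrim=0,parejas=9):
--     """
--     Funcionalidad: Indica la cantidad de personas en la generación
--     Entradas:
--     gen= generación a la que se debe llegar
--     genPrim= Primera gen
--     parejas= Parejas que se forman en la primer gen
--     Salidas: Cantidad de personas en la gen
--     Restricciones: Los datos deben ser enteros positivos
--     """
--     if genPrim==0:
--         parejas=parejas*3
--         if genPrim==gen:
--             return parejas
--         else:
--             return colonizarAux(gen,genPrim+1,parejas)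
--     else:
--         parejas=((parejas-1)//2)*3
--         if genPrim==gen:
--             return parejas
--         else:
--             return colonizarAux(gen,genPrim+1,parejas)
-- ===== SOURCE B (Python) =====
-- def colonizarAux(gen, genPrim=0, parejas=9):
--     while True:
--         if genPrim == 0:
--             parejas = parejas * 3
--         else:
--             parejas = ((parejas - 1) // 2) * 3
--         if genPrim == gen:
--             return parejas
--         genPrim += 1
-- ===== Notes on version B (the rewrite author's own statement) =====
-- stated objective: idiomatic
-- what changed: Replaced the tail recursion with a plain iterative while-loop over the same per-generation update; no recursion depth limit and no extra call frames.
import Mathlib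
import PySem

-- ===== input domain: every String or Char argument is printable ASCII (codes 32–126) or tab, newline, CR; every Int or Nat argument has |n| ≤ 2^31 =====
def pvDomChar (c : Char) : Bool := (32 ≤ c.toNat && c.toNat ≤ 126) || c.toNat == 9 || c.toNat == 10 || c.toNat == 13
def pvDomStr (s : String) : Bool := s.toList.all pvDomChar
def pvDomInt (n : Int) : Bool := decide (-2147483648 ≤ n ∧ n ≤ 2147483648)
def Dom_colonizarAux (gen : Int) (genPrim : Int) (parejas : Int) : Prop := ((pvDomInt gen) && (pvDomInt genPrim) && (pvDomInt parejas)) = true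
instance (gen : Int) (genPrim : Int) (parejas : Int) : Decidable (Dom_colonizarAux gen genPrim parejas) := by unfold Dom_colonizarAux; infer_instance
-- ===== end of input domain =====

-- B replaces A's tail recursion by an iterative loop over the same per-generation update (objective: idiomatic).

-- ===== PORT A =====
-- A's recursion, with fuel (gen - genPrim).toNat + 1, which is exactly the number of
-- calls A makes when genPrim ≤ gen; the fuel-0 branch is unreachable under Pre_.
def colonizarAuxGo (fuel : Nat) (gen : Int) (genPrim : Int) (parejas : Int) : Int :=
  match fuel with
  | 0 => parejas
  | fuel + 1 =>
    if genPrim = 0 then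
      let parejas := parejas * 3
      if genPrim = gen then parejas
      else colonizarAuxGo fuel gen (genPrim + 1) parejas
    else
      let parejas := (PySem.Int.floordiv (parejas - 1) 2) * 3
      if genPrim = gen then parejas
      else colonizarAuxGo fuel gen (genPrim + 1) parejas

def colonizarAux (gen : Int) (genPrim : Int) (parejas : Int) : Int :=
  colonizarAuxGo ((gen - genPrim).toNat + 1) gen genPrim parejas

-- ===== PORT B =====
-- B's while-loop body: one update of `parejas` at generation counter gp.
def colonizarStep (gp : Int) (p : Int) : Int :=
  if gp = 0 then p * 3 else (PySem.Int.floordiv (p - 1) 2) * 3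

-- the loop runs with genPrim = genPrim, genPrim+1, …, gen, once each, then returns
def colonizarAux_alt (gen : Int) (genPrim : Int) (parejas : Int) : Int :=
  (List.range ((gen - genPrim).toNat + 1)).foldl
    (fun (p : Int) (i : Nat) => colonizarStep (genPrim + (i : Int)) p) parejas

-- ===== PRECONDITION & SPEC =====
-- A raises RecursionError (and B loops forever) when genPrim > gen: excluded.
def Pre_colonizarAux (gen : Int) (genPrim : Int) (parejas : Int) : Prop := genPrim ≤ gen
instance (gen : Int) (genPrim : Int) (parejas : Int) : Decidable (Pre_colonizarAux gen genPrim parejas) := by unfold Pre_colonizarAux; infer_instance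
def pvWitness_colonizarAux : Int × Int × Int := (5, 0, 9)

def Spec_colonizarAux (gen : Int) (genPrim : Int) (parejas : Int) (out : Int) : Prop := out = colonizarAux_alt gen genPrim parejas
instance (gen : Int) (genPrim : Int) (parejas : Int) (out : Int) : Decidable (Spec_colonizarAux gen genPrim parejas out) := by unfold Spec_colonizarAux; infer_instance

-- ===== CLAIM (what is proved, stated in full; the proofs are below) =====
def Claim_equal_colonizarAux : Prop := ∀ (gen : Int) (genPrim : Int) (parejas : Int), Dom_colonizarAux gen genPrim parejas → Pre_colonizarAux gen genPrim parejas → Spec_colonizarAux gen genPrim parejas (colonizarAux gen genPrim parejas)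

-- ===== LEMMAS AND PROOFS =====

theorem foldl_range_succ_shift (f : Int → Nat → Int) (c : Int) (n : Nat) :
    (List.range (n + 1)).foldl f c = (List.range n).foldl (fun p i => f p (i + 1)) (f c 0) := by
  rw [List.range_succ_eq_map, List.foldl_cons, List.foldl_map]

theorem colonizarAuxGo_eq_fold (n : Nat) : ∀ (genPrim parejas : Int),
    colonizarAuxGo (n + 1) (genPrim + (n : Int)) genPrim parejas =
      (List.range (n + 1)).foldl (fun (p : Int) (i : Nat) => colonizarStep (genPrim + (i : Int)) p) parejas := by
  induction n with
  | zero =>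
    intro genPrim parejas
    simp [colonizarAuxGo, colonizarStep]
  | succ n ih =>
    intro genPrim parejas
    have harith : genPrim + ((n + 1 : Nat) : Int) = (genPrim + 1) + (n : Int) := by
      push_cast; ring
    have hstep : colonizarAuxGo (n + 1 + 1) (genPrim + ((n + 1 : Nat) : Int)) genPrim parejas =
        colonizarAuxGo (n + 1) ((genPrim + 1) + (n : Int)) (genPrim + 1)
          (colonizarStep genPrim parejas) := by
      rw [harith]
      by_cases h0 : genPrim = 0
      · simp [colonizarAuxGo, colonizarStep, h0]
        omega
      · simp [colonizarAuxGo, colonizarStep, h0]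
        omega
    rw [hstep, ih (genPrim + 1) (colonizarStep genPrim parejas)]
    -- shift the fold index on the right-hand side
    conv_rhs => rw [foldl_range_succ_shift]
    have h0 : genPrim + ((0 : Nat) : Int) = genPrim := by norm_num
    have h1 : ∀ i : Nat, genPrim + (((i + 1 : Nat)) : Int) = genPrim + 1 + (i : Int) := by
      intro i; push_cast; ring
    simp only [h0, h1]

-- ===== VERDICT (by name: the statement is the Claim_ definition above) =====
theorem colonizarAux_spec : Claim_equal_colonizarAux := by
  intro gen genPrim parejas _ hpre
  have hle : genPrim ≤ gen := hpre
  unfold Spec_colonizarAux colonizarAux colonizarAux_alt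
  obtain ⟨n, hn⟩ : ∃ n : Nat, gen = genPrim + (n : Int) := ⟨(gen - genPrim).toNat, by omega⟩
  subst hn
  have ht : (genPrim + (n : Int) - genPrim).toNat = n := by omega
  rw [ht]
  exact colonizarAuxGo_eq_fold n genPrim parejas
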